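-- pv_equiv track=rewrite | github.com/ahdez88/blps-dash | meta_dashboard.py | classify_campaign_type
-- ===== SOURCE A (Python) =====
-- def classify_campaign_type(name, objective):
--     """Classify campaign by type based on name patterns and objective."""
--     name_upper = name.upper()
--
--     # Sales/Conversions (by objective first)
--     if objective == "OUTCOME_SALES":
--         return "Sales / Conversiones"
--
--     # Traffic
--     if objective == "OUTCOME_TRAFFIC":
--         return "Tráfico"
--
--     # WhatsApp (check before general messages)
--     if any(kw in name_upper for kw in ["WHA", "WPP", "WHATS APP", "WHATSAPP"]):
--         return "WhatsApp"
--
--     # Messages / Instagram DM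
--     if any(kw in name_upper for kw in ["MESSAGE", "-MES-", "| MES |", "DIRECT", "[MESSAGE]"]):
--         return "Mensajes IG/DM"
--
--     # Brand / Awareness / Video
--     if objective == "OUTCOME_AWARENESS":
--         return "Brand / Awareness"
--     if any(kw in name_upper for kw in ["VIDEO PLAY", "REPRODUCCIONVIDEO", "VDEO_PLAY", "VIDEO_PLAY"]):
--         return "Brand / Awareness"
--     if any(kw in name_upper for kw in ["[REACH]", "BA |", "ENGAGEMENT |"]):
--         return "Brand / Awareness"
--
--     # Call Center (engagement but specific)
--     if "CALL CENTER" in name_upper: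
--         return "Mensajes IG/DM"
--
--     # Instant Form (check before LP since some IF campaigns have OUTCOME_LEADS)
--     if any(kw in name_upper for kw in [
--         "IF ", "IF|", "IF-", "-IF-",
--         "INSTANTFORM", "INSTANT FORM",
--         "LEADSONFB", "[FORMS]", "FORMS |",
--         "-IF_", "IF_"
--     ]):
--         return "Instant Form"
--
--     # Landing Page / Website
--     if any(kw in name_upper for kw in [
--         "LP", "WEBSITE", "WEB ", "WEB|", "-LP-",
--         "[WEBSITE]", "[SITE]", "SITE |",
--         "CADASTRO"
--     ]):
--         return "Landing Page"
--
--     # Fallback by objective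
--     if objective == "OUTCOME_LEADS":
--         return "Leads (sin clasificar)"
--     if objective == "OUTCOME_ENGAGEMENT":
--         return "Engagement (sin clasificar)"
--
--     return "Otro"
-- ===== SOURCE B (Python) =====
-- def _has_any(haystack, needles):
--     return any(n in haystack for n in needles)
--
--
-- # Rules in priority order (highest priority first); each is a predicate over
-- # (uppercased name, objective) paired with its label.
-- RULES = [
--     (lambda nu, o: o == "OUTCOME_SALES", "Sales / Conversiones"),
--     (lambda nu, o: o == "OUTCOME_TRAFFIC", "Tr\u00e1fico"),
--     (lambda nu, o: _has_any(nu, ["WHA", "WPP", "WHATS APP", "WHATSAPP"]), "WhatsApp"),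
--     (lambda nu, o: _has_any(nu, ["MESSAGE", "-MES-", "| MES |", "DIRECT", "[MESSAGE]"]), "Mensajes IG/DM"),
--     (lambda nu, o: o == "OUTCOME_AWARENESS", "Brand / Awareness"),
--     (lambda nu, o: _has_any(nu, ["VIDEO PLAY", "REPRODUCCIONVIDEO", "VDEO_PLAY", "VIDEO_PLAY"]), "Brand / Awareness"),
--     (lambda nu, o: _has_any(nu, ["[REACH]", "BA |", "ENGAGEMENT |"]), "Brand / Awareness"),
--     (lambda nu, o: "CALL CENTER" in nu, "Mensajes IG/DM"),
--     (lambda nu, o: _has_any(nu, ["IF ", "IF|", "IF-", "-IF-", "INSTANTFORM", "INSTANT FORM",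
--                                  "LEADSONFB", "[FORMS]", "FORMS |", "-IF_", "IF_"]), "Instant Form"),
--     (lambda nu, o: _has_any(nu, ["LP", "WEBSITE", "WEB ", "WEB|", "-LP-",
--                                  "[WEBSITE]", "[SITE]", "SITE |", "CADASTRO"]), "Landing Page"),
--     (lambda nu, o: o == "OUTCOME_LEADS", "Leads (sin clasificar)"),
--     (lambda nu, o: o == "OUTCOME_ENGAGEMENT", "Engagement (sin clasificar)"),
-- ]
--
--
-- def classify_campaign_type(name, objective):
--     """Evaluate EVERY rule, lowest priority first, overwriting the answer on
--     each match (last write wins = highest-priority match); no early return."""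
--     nu = name.upper()
--     result = "Otro"
--     for test, label in reversed(RULES):
--         if test(nu, objective):
--             result = label
--     return result
-- ===== Notes on version B (the rewrite author's own statement) =====
-- stated objective: alternative
-- what changed: B evaluates every rule unconditionally, sweeping the rule list from lowest to highest priority with a last-write-wins accumulator (no early return), instead of A's top-down short-circuiting if-cascade; correct because overwriting in reverse priority order leaves exactly the highest-priority match.
import Mathlib
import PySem

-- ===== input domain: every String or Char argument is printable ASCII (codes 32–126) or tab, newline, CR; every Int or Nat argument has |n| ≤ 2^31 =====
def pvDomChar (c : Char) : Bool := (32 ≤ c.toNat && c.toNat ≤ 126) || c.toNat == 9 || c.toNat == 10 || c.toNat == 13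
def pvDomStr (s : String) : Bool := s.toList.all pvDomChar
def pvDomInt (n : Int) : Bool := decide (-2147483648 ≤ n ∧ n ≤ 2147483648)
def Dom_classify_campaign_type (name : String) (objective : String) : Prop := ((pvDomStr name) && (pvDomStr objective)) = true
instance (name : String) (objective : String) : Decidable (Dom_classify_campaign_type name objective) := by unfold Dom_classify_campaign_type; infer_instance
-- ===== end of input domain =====

-- B replaces A's short-circuiting if-cascade by an exhaustive reverse sweep over the rules with a last-write-wins accumulator (objective: alternative).

-- ===== PORT A =====
def classify_campaign_type (name : String) (objective : String) : String :=
  let name_upper := PySem.Str.upper name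
  if objective = "OUTCOME_SALES" then "Sales / Conversiones"
  else if objective = "OUTCOME_TRAFFIC" then "Tr\u00e1fico"
  else if ["WHA", "WPP", "WHATS APP", "WHATSAPP"].any (fun kw => PySem.Str.isIn kw name_upper) then "WhatsApp"
  else if ["MESSAGE", "-MES-", "| MES |", "DIRECT", "[MESSAGE]"].any (fun kw => PySem.Str.isIn kw name_upper) then "Mensajes IG/DM"
  else if objective = "OUTCOME_AWARENESS" then "Brand / Awareness"
  else if ["VIDEO PLAY", "REPRODUCCIONVIDEO", "VDEO_PLAY", "VIDEO_PLAY"].any (fun kw => PySem.Str.isIn kw name_upper) then "Brand / Awareness"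
  else if ["[REACH]", "BA |", "ENGAGEMENT |"].any (fun kw => PySem.Str.isIn kw name_upper) then "Brand / Awareness"
  else if PySem.Str.isIn "CALL CENTER" name_upper then "Mensajes IG/DM"
  else if ["IF ", "IF|", "IF-", "-IF-", "INSTANTFORM", "INSTANT FORM", "LEADSONFB", "[FORMS]", "FORMS |", "-IF_", "IF_"].any (fun kw => PySem.Str.isIn kw name_upper) then "Instant Form"
  else if ["LP", "WEBSITE", "WEB ", "WEB|", "-LP-", "[WEBSITE]", "[SITE]", "SITE |", "CADASTRO"].any (fun kw => PySem.Str.isIn kw name_upper) then "Landing Page"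
  else if objective = "OUTCOME_LEADS" then "Leads (sin clasificar)"
  else if objective = "OUTCOME_ENGAGEMENT" then "Engagement (sin clasificar)"
  else "Otro"

-- ===== PORT B =====
-- Source B's _has_any helper
def hasAny (haystack : String) (needles : List String) : Bool :=
  needles.any (fun n => PySem.Str.isIn n haystack)

-- Source B's RULES: priority-ordered (highest first) predicates over (uppercased name, objective) with labels
def campaignRules : List ((String → String → Bool) × String) :=
  [ (fun _ o => o == "OUTCOME_SALES", "Sales / Conversiones"),
    (fun _ o => o == "OUTCOME_TRAFFIC", "Tr\u00e1fico"),
    (fun nu _ => hasAny nu ["WHA", "WPP", "WHATS APP", "WHATSAPP"], "WhatsApp"),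
    (fun nu _ => hasAny nu ["MESSAGE", "-MES-", "| MES |", "DIRECT", "[MESSAGE]"], "Mensajes IG/DM"),
    (fun _ o => o == "OUTCOME_AWARENESS", "Brand / Awareness"),
    (fun nu _ => hasAny nu ["VIDEO PLAY", "REPRODUCCIONVIDEO", "VDEO_PLAY", "VIDEO_PLAY"], "Brand / Awareness"),
    (fun nu _ => hasAny nu ["[REACH]", "BA |", "ENGAGEMENT |"], "Brand / Awareness"),
    (fun nu _ => PySem.Str.isIn "CALL CENTER" nu, "Mensajes IG/DM"),
    (fun nu _ => hasAny nu ["IF ", "IF|", "IF-", "-IF-", "INSTANTFORM", "INSTANT FORM", "LEADSONFB", "[FORMS]", "FORMS |", "-IF_", "IF_"], "Instant Form"),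
    (fun nu _ => hasAny nu ["LP", "WEBSITE", "WEB ", "WEB|", "-LP-", "[WEBSITE]", "[SITE]", "SITE |", "CADASTRO"], "Landing Page"),
    (fun _ o => o == "OUTCOME_LEADS", "Leads (sin clasificar)"),
    (fun _ o => o == "OUTCOME_ENGAGEMENT", "Engagement (sin clasificar)") ]

-- Source B's loop: evaluate every rule, lowest priority first, overwriting on match
def classify_campaign_type_alt (name : String) (objective : String) : String :=
  let nu := PySem.Str.upper name
  campaignRules.reverse.foldl
    (fun result r => if r.1 nu objective then r.2 else result) "Otro"

-- ===== PRECONDITION & SPEC =====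
def Spec_classify_campaign_type (name : String) (objective : String) (out : String) : Prop := out = classify_campaign_type_alt name objective
instance (name : String) (objective : String) (out : String) : Decidable (Spec_classify_campaign_type name objective out) := by unfold Spec_classify_campaign_type; infer_instance

-- ===== CLAIM (what is proved, stated in full; the proofs are below) =====
def Claim_equal_classify_campaign_type : Prop := ∀ (name : String) (objective : String), Dom_classify_campaign_type name objective → Spec_classify_campaign_type name objective (classify_campaign_type name objective)

-- ===== LEMMAS AND PROOFS =====

-- ===== VERDICT (by name: the statement is the Claim_ definition above) =====
theorem classify_campaign_type_spec : Claim_equal_classify_campaign_type := by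
  intro name objective _
  unfold Spec_classify_campaign_type classify_campaign_type classify_campaign_type_alt
  simp only [campaignRules, hasAny, List.reverse, List.reverseAux, List.foldl,
    List.any_cons, List.any_nil, Bool.or_false, beq_iff_eq]
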